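-- pv_equiv track=rewrite | github.com/zangwoo-jeon/- | 기약행사다리꼴.py | pivoting
-- ===== SOURCE A (Python) =====
-- def pivoting(mat):
--     row_idx = list(range(len(mat)))
--     col_idx = len(mat[0])
--     pivot_mat = []
--     for c in range(col_idx):
--         rows_with_one = [k for k in row_idx if mat[k][c] == 1]
--         if rows_with_one:
--             for idx in rows_with_one:
--                 pivot_mat.append(mat[idx])
--                 row_idx.remove(idx)
--                 break
--         rows_with_nonzero = [r for r in row_idx if mat[r][c] != 0]
--         if rows_with_nonzero:
--             for idx in rows_with_nonzero:
--                 pivot_mat.append(mat[idx])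
--                 row_idx.remove(idx)
--     return pivot_mat
-- ===== SOURCE B (Python) =====
-- def pivoting(mat):
--     cols = len(mat[0])
--
--     def first_nonzero(row):
--         for c, v in enumerate(row[:cols]):
--             if v != 0:
--                 return c
--         return None
--
--     pivots = [first_nonzero(row) for row in mat]
--     out = []
--     for c in range(cols):
--         grp = [r for r in range(len(mat)) if pivots[r] == c]
--         ones = [r for r in grp if mat[r][c] == 1]
--         if ones:
--             grp = [ones[0]] + [r for r in grp if r != ones[0]]
--         out.extend(mat[r] for r in grp)
--     return out
-- ===== Notes on version B (the rewrite author's own statement) =====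
-- stated objective: alternative
-- what changed: B precomputes each row's first-nonzero (pivot) column once and emits, per column, the bucket of rows pivoting there with the first value-1 row moved to the front, instead of A's per-column re-filtering of a shrinking row-index list with list.remove.
-- outside the precondition, e.g. on pivoting([[0, 1], [0]]): A raises IndexError, B returns [[0, 1]]
-- crash fix: On nonempty matrices containing an all-zero row shorter than the first row, A raises IndexError (it keeps indexing that row at column len(row)); B skips such pivotless rows and returns the pivoted matrix. — e.g. on pivoting([[0, 1], [0]]): A raises IndexError, B returns [[0, 1]]
import Mathlib
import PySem

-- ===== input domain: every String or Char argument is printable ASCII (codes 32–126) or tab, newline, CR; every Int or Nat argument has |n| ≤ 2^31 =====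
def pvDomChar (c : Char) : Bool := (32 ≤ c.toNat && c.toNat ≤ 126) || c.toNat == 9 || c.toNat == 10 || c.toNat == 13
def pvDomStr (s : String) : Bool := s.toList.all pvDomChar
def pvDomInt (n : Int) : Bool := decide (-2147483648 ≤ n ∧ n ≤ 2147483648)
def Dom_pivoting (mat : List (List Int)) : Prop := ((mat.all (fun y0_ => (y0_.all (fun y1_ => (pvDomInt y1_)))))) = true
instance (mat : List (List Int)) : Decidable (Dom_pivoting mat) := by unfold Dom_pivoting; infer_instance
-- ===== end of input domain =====

-- B groups rows once by their first-nonzero column instead of repeatedly filtering a shrinking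
-- index list with list.remove; equality of the RETURN value is what is proved (neither mutates mat).

-- mat[r] / mat[r][c]; the defaults are unobserved inside Pre_ (Python raises exactly outside Pre_)
def pivRow (mat : List (List Int)) (r : Nat) : List Int := mat.getD r []
def pivVal (mat : List (List Int)) (c r : Nat) : Int := (pivRow mat r).getD c 0

-- ===== PORT A =====
-- one column step of A's loop: pick the first remaining row with a 1, then all remaining nonzero rows
def stepA (mat : List (List Int)) (st : List Nat × List (List Int)) (c : Nat) :
    List Nat × List (List Int) :=
  let rowsWithOne := st.1.filter (fun k => pivVal mat c k == 1)
  let st' := match rowsWithOne with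
    | [] => st
    | idx :: _ => (st.1.erase idx, st.2 ++ [pivRow mat idx])
  let rowsWithNonzero := st'.1.filter (fun r => pivVal mat c r != 0)
  rowsWithNonzero.foldl (fun st idx => (st.1.erase idx, st.2 ++ [pivRow mat idx])) st'

def pivoting (mat : List (List Int)) : List (List Int) :=
  ((List.range (mat.headD []).length).foldl (stepA mat) (List.range mat.length, [])).2

-- ===== PORT B =====
-- Source B's first_nonzero(row): first c < cols with row[c] ≠ 0 (positions ≥ len(row) read as 0,
-- never matching — exactly row[:cols])
def firstNonzero (cols : Nat) (row : List Int) : Option Nat :=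
  (List.range cols).find? (fun c => row.getD c 0 != 0)

-- Source B's loop body for column c: the bucket grp, the first row with a 1 moved to the front
def stepB (mat : List (List Int)) (pivots : List (Option Nat)) (out : List (List Int)) (c : Nat) :
    List (List Int) :=
  let grp := (List.range mat.length).filter (fun r => pivots.getD r none == some c)
  let grp' := match grp.filter (fun r => pivVal mat c r == 1) with
    | [] => grp
    | o :: _ => o :: grp.filter (fun r => r != o)
  out ++ grp'.map (pivRow mat)

def pivoting_alt (mat : List (List Int)) : List (List Int) :=
  let cols := (mat.headD []).length
  (List.range cols).foldl (stepB mat (mat.map (firstNonzero cols))) []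

-- ===== PRECONDITION & SPEC =====
-- Pre_ excludes exactly the inputs where Python A raises IndexError: the empty matrix (mat[0]),
-- and matrices with an all-zero row shorter than the first row (mat[k][c] is reached at c = len(row)).
def Pre_pivoting (mat : List (List Int)) : Prop :=
  mat ≠ [] ∧ ∀ row ∈ mat, row.length < (mat.headD []).length → ∃ x ∈ row, x ≠ 0
instance (mat : List (List Int)) : Decidable (Pre_pivoting mat) := by
  unfold Pre_pivoting; infer_instance
def pvWitness_pivoting : List (List Int) := [[0, 2, 1], [1, 0, 0], [0, 1, 0]]

-- A raises IndexError on nonempty matrices containing an all-zero row shorter than the first row;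
-- B simply skips such rows (they have no pivot column) and returns the pivoted matrix.
def Raises_pivoting (mat : List (List Int)) : Prop :=
  mat ≠ [] ∧ ∃ row ∈ mat, row.length < (mat.headD []).length ∧ ∀ x ∈ row, x = 0
instance (mat : List (List Int)) : Decidable (Raises_pivoting mat) := by
  unfold Raises_pivoting; infer_instance
def pvRaiseWitness_pivoting : List (List Int) := [[0, 1], [0]]
def pvRaiseWitnessOut_pivoting : List (List Int) := [[0, 1]]

def Spec_pivoting (mat : List (List Int)) (out : List (List Int)) : Prop := out = pivoting_alt mat
instance (mat : List (List Int)) (out : List (List Int)) : Decidable (Spec_pivoting mat out) := by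
  unfold Spec_pivoting; infer_instance

-- ===== CLAIM (what is proved, stated in full; the proofs are below) =====
def Claim_equal_pivoting : Prop :=
  ∀ (mat : List (List Int)), Dom_pivoting mat → Pre_pivoting mat → Spec_pivoting mat (pivoting mat)
def Claim_raises_pivoting : Prop :=
  (∀ (mat : List (List Int)), Dom_pivoting mat → Raises_pivoting mat → ¬ Pre_pivoting mat) ∧
  (Dom_pivoting (pvRaiseWitness_pivoting) ∧ Raises_pivoting (pvRaiseWitness_pivoting) ∧
    pivoting_alt (pvRaiseWitness_pivoting) = pvRaiseWitnessOut_pivoting)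

-- ===== LEMMAS AND PROOFS =====

-- after columns 0..c-1, a row index is still unplaced iff its first-nonzero column is ≥ c (or none)
def keepP (cols : Nat) (mat : List (List Int)) (c r : Nat) : Bool :=
  match firstNonzero cols (pivRow mat r) with
  | none => true
  | some p => decide (c ≤ p)

theorem find?_range_min (q : Nat → Bool) :
    ∀ (n p : Nat), (List.range n).find? q = some p →
      p < n ∧ q p = true ∧ ∀ j < p, q j = false := by
  intro n
  induction n with
  | zero => simp
  | succ m ih =>
    intro p h
    rw [List.range_succ, List.find?_append] at h
    cases hf : (List.range m).find? q with
    | some x =>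
      rw [hf] at h
      simp only [Option.some_or] at h
      obtain ⟨h1, h2, h3⟩ := ih x hf
      cases h
      exact ⟨Nat.lt_succ_of_lt h1, h2, h3⟩
    | none =>
      rw [hf] at h
      simp only [Option.none_or] at h
      have hq : ∀ j < m, q j = false := by
        intro j hj
        have := List.find?_eq_none.mp hf j (List.mem_range.mpr hj)
        simpa using this
      cases hm : q m with
      | true =>
        simp only [List.find?, hm , Option.some.injEq] at h
        subst h
        exact ⟨Nat.lt_succ_self m, hm, hq⟩
      | false => simp only [List.find?, hm] at h; cases h

theorem fnz_none (cols : Nat) (row : List Int)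
    (h : firstNonzero cols row = none) : ∀ c < cols, row.getD c 0 = 0 := by
  intro c hc
  have := List.find?_eq_none.mp h c (List.mem_range.mpr hc)
  simpa using this

theorem fnz_some (cols : Nat) (row : List Int) (p : Nat)
    (h : firstNonzero cols row = some p) :
    p < cols ∧ row.getD p 0 ≠ 0 ∧ ∀ j < p, row.getD j 0 = 0 := by
  obtain ⟨h1, h2, h3⟩ := find?_range_min _ cols p h
  refine ⟨h1, by simpa using h2, fun j hj => by simpa using h3 j hj⟩

-- for a still-unplaced row at column c < cols: nonzero entry at c ↔ c is its pivot column
theorem val_iff_pivot (cols : Nat) (mat : List (List Int)) (c r : Nat)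
    (hc : c < cols) (hk : keepP cols mat c r = true) :
    (pivVal mat c r ≠ 0) ↔ firstNonzero cols (pivRow mat r) = some c := by
  unfold keepP at hk
  constructor
  · intro hv
    cases hf : firstNonzero cols (pivRow mat r) with
    | none => exact absurd (fnz_none _ _ hf c hc) hv
    | some p =>
      rw [hf] at hk
      have hcp : c ≤ p := by simpa using hk
      rcases Nat.lt_or_ge c p with hlt | hge
      · exact absurd ((fnz_some _ _ _ hf).2.2 c hlt) hv
      · have : p = c := Nat.le_antisymm hge hcp
        rw [this]
  · intro hf
    exact (fnz_some _ _ _ hf).2.1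

theorem keep_succ (cols : Nat) (mat : List (List Int)) (c r : Nat)
    (hc : c < cols) (hk : keepP cols mat c r = true) :
    keepP cols mat (c + 1) r = (pivVal mat c r == 0) := by
  by_cases hv : pivVal mat c r = 0
  · simp only [hv, beq_self_eq_true]
    unfold keepP at hk ⊢
    cases hf : firstNonzero cols (pivRow mat r) with
    | none => rfl
    | some p =>
      rw [hf] at hk
      have hcp : c ≤ p := by simpa using hk
      have : c ≠ p := by
        intro h; subst h
        exact (fnz_some _ _ _ hf).2.1 hv
      simpa using Nat.lt_of_le_of_ne hcp this
  · have hf := (val_iff_pivot cols mat c r hc hk).mp hv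
    unfold keepP
    rw [hf]
    simp [hv]

theorem keep_zero (cols : Nat) (mat : List (List Int)) (r : Nat) :
    keepP cols mat 0 r = true := by
  unfold keepP
  cases firstNonzero cols (pivRow mat r) <;> simp

theorem getD_map_fnz (cols : Nat) (mat : List (List Int)) (r : Nat) (hr : r < mat.length) :
    (mat.map (firstNonzero cols)).getD r none = firstNonzero cols (pivRow mat r) := by
  simp [List.getD_eq_getElem?_getD, List.getElem?_map, List.getElem?_eq_getElem hr, pivRow,
    List.getD_eq_getElem?_getD]

-- A's inner append-and-erase loop, split into its two components
theorem foldl_erase_append (mat : List (List Int)) :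
    ∀ (L l : List Nat) (out : List (List Int)),
      L.foldl (fun st idx => (st.1.erase idx, st.2 ++ [pivRow mat idx])) (l, out)
        = (L.foldl List.erase l, out ++ L.map (pivRow mat)) := by
  intro L
  induction L with
  | nil => simp
  | cons a t ih => intro l out; simp [ih, List.append_assoc]

theorem foldl_erase_cons (a : Nat) :
    ∀ (L l : List Nat), a ∉ L → L.foldl List.erase (a :: l) = a :: L.foldl List.erase l := by
  intro L
  induction L with
  | nil => simp
  | cons x t ih =>
    intro l hx
    simp only [List.mem_cons, not_or] at hx
    have : (a :: l).erase x = a :: l.erase x := by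
      rw [List.erase_cons]
      simp [hx.1]
    simp only [List.foldl_cons, this]
    exact ih _ hx.2

-- erasing every element of l.filter p from a duplicate-free l leaves l.filter (¬ p)
theorem foldl_erase_filter (p : Nat → Bool) :
    ∀ (l : List Nat), l.Nodup → (l.filter p).foldl List.erase l = l.filter (fun x => !(p x)) := by
  intro l
  induction l with
  | nil => simp
  | cons a t ih =>
    intro hnd
    obtain ⟨ha, ht⟩ := List.nodup_cons.mp hnd
    cases hp : p a with
    | true =>
      rw [List.filter_cons_of_pos hp, List.foldl_cons, List.erase_cons_head, ih ht,
        List.filter_cons_of_neg (by simp [hp])]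
    | false =>
      have hnotin : a ∉ t.filter p := fun h => ha (List.mem_of_mem_filter h)
      rw [List.filter_cons_of_neg (by simp [hp]), foldl_erase_cons a _ _ hnotin, ih ht,
        List.filter_cons_of_pos (by simp [hp])]

theorem keep_succ_false (cols : Nat) (mat : List (List Int)) (c r : Nat)
    (h : keepP cols mat c r = false) : keepP cols mat (c + 1) r = false := by
  unfold keepP at h ⊢
  cases hf : firstNonzero cols (pivRow mat r) with
  | none => rw [hf] at h; simp at h
  | some p => rw [hf] at h; simp at h ⊢; omega

-- one column: A's step sends (unplaced rows at c, out) to (unplaced rows at c+1, out ++ B's block c)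
theorem step_eq (mat : List (List Int)) (cols c : Nat) (hc : c < cols) (out : List (List Int)) :
    stepA mat ((List.range mat.length).filter (keepP cols mat c), out) c
      = ((List.range mat.length).filter (keepP cols mat (c + 1)),
         stepB mat (mat.map (firstNonzero cols)) out c) := by
  have F0 : ((List.range mat.length).filter (keepP cols mat c)).Nodup :=
    List.Nodup.filter _ List.nodup_range
  have F1 : ∀ r ∈ List.range mat.length,
      ((mat.map (firstNonzero cols)).getD r none == some c)
        = (keepP cols mat c r && (pivVal mat c r != 0)) := by
    intro r hr
    rw [getD_map_fnz cols mat r (List.mem_range.mp hr)]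
    by_cases hf : firstNonzero cols (pivRow mat r) = some c
    · have hv : pivVal mat c r ≠ 0 := (fnz_some _ _ _ hf).2.1
      have hk : keepP cols mat c r = true := by unfold keepP; rw [hf]; simp
      simp [hf, hk, hv]
    · have hL : (firstNonzero cols (pivRow mat r) == some c) = false := by simpa using hf
      rw [hL]; symm
      cases hk : keepP cols mat c r with
      | false => simp
      | true =>
        cases hv : (pivVal mat c r != 0) with
        | false => simp
        | true =>
          exact absurd ((val_iff_pivot cols mat c r hc hk).mp (by simpa using hv)) hf
  -- the bucket for column c is exactly the still-unplaced rows with a nonzero entry at c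
  have hgrp : (List.range mat.length).filter
        (fun r => (mat.map (firstNonzero cols)).getD r none == some c)
      = ((List.range mat.length).filter (keepP cols mat c)).filter
          (fun r => pivVal mat c r != 0) := by
    rw [List.filter_filter]
    exact List.filter_congr fun r hr => by rw [F1 r hr, Bool.and_comm]
  -- the two "rows with a 1" lists coincide
  have hones : (((List.range mat.length).filter (keepP cols mat c)).filter
        (fun r => pivVal mat c r != 0)).filter (fun r => pivVal mat c r == 1)
      = ((List.range mat.length).filter (keepP cols mat c)).filter
          (fun r => pivVal mat c r == 1) := by
    rw [List.filter_filter]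
    refine List.filter_congr fun r _ => ?_
    cases hv : (pivVal mat c r == 1) with
    | false => simp
    | true =>
      have : pivVal mat c r ≠ 0 := by
        have := eq_of_beq hv; omega
      simp [this]
  -- the leftover rows after column c are the unplaced rows at c+1
  have hnext : ∀ (l : List Nat), l = (List.range mat.length).filter (keepP cols mat c) →
      l.filter (fun x => !(pivVal mat c x != 0))
        = (List.range mat.length).filter (keepP cols mat (c + 1)) := by
    intro l hl; subst hl
    rw [List.filter_filter]
    refine List.filter_congr fun r _ => ?_
    cases hk : keepP cols mat c r with
    | false => simp [keep_succ_false cols mat c r hk]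
    | true => rw [keep_succ cols mat c r hc hk]; simp [bne]
  unfold stepA stepB
  simp only [hgrp, hones]
  cases hmatch : ((List.range mat.length).filter (keepP cols mat c)).filter
      (fun r => pivVal mat c r == 1) with
  | nil =>
    simp only [foldl_erase_append mat]
    rw [foldl_erase_filter _ _ F0, hnext _ rfl]
  | cons o rest =>
    have ho : o ∈ ((List.range mat.length).filter (keepP cols mat c)).filter
        (fun r => pivVal mat c r == 1) := by rw [hmatch]; exact List.mem_cons_self
    have hoval : pivVal mat c o = 1 := by
      have h := List.of_mem_filter ho; simpa using h
    have hoR : o ∈ (List.range mat.length).filter (keepP cols mat c) :=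
      List.mem_of_mem_filter ho
    have herase : ((List.range mat.length).filter (keepP cols mat c)).erase o
        = ((List.range mat.length).filter (keepP cols mat c)).filter (fun x => x != o) :=
      List.Nodup.erase_eq_filter F0 o
    have hndE : (((List.range mat.length).filter (keepP cols mat c)).erase o).Nodup :=
      List.Nodup.erase o F0
    simp only [foldl_erase_append mat]
    rw [foldl_erase_filter _ _ hndE]
    simp only [Prod.mk.injEq]
    constructor
    · -- remaining row indices coincide
      rw [herase, List.filter_filter, List.filter_filter]
      rw [← hnext _ rfl, List.filter_filter]
      refine List.filter_congr fun r _ => ?_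
      cases hv : (pivVal mat c r != 0) with
      | true => simp
      | false =>
        have h0 : pivVal mat c r = 0 := by simpa using hv
        have : (r != o) = true := by
          simp only [bne_iff_ne, ne_eq]
          intro h; rw [h, hoval] at h0; omega
        simp [this]
    · -- emitted rows coincide
      rw [herase]
      have e1 : List.filter (fun r => pivVal mat c r != 0)
          (List.filter (fun x => x != o) (List.filter (keepP cols mat c) (List.range mat.length)))
          = List.filter (fun r => r != o)
            (List.filter (fun r => pivVal mat c r != 0)
              (List.filter (keepP cols mat c) (List.range mat.length))) := by
        simp only [List.filter_filter]
        exact List.filter_congr fun r _ => by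
          cases pivVal mat c r != 0 <;> cases r != o <;> cases keepP cols mat c r <;> rfl
      rw [e1]
      simp [List.append_assoc]

theorem main_inv (mat : List (List Int)) :
    ∀ c, c ≤ (mat.headD []).length →
      (List.range c).foldl (stepA mat) (List.range mat.length, [])
        = ((List.range mat.length).filter (keepP (mat.headD []).length mat c),
           (List.range c).foldl (stepB mat (mat.map (firstNonzero (mat.headD []).length))) []) := by
  intro c
  induction c with
  | zero =>
    intro _
    simp only [List.range_zero, List.foldl_nil]
    rw [List.filter_eq_self.mpr fun r _ => keep_zero (mat.headD []).length mat r]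
  | succ m ih =>
    intro hm
    rw [List.range_succ, List.foldl_append, List.foldl_append, ih (Nat.le_of_succ_le hm)]
    simp only [List.foldl_cons, List.foldl_nil]
    exact step_eq mat (mat.headD []).length m (Nat.lt_of_succ_le hm) _

-- ===== VERDICT (by name: the statement is the Claim_ definition above) =====
theorem pivoting_spec : Claim_equal_pivoting := by
  intro mat _ _
  unfold Spec_pivoting pivoting pivoting_alt
  rw [main_inv mat (mat.headD []).length (Nat.le_refl _)]

@[simp] theorem pivoting_raises : Claim_raises_pivoting := by
  unfold Claim_raises_pivoting
  constructor
  · rintro mat _ ⟨hne, row, hrow, hlen, hzero⟩ ⟨_, hpre⟩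
    obtain ⟨x, hx, hxne⟩ := hpre row hrow hlen
    exact hxne (hzero x hx)
  · exact ⟨by decide, by decide, by decide⟩
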